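-- pv_equiv track=rewrite | github.com/kserm/yapr_algorithms_2 | 12_abs_fibo.py | abs_fibo
-- ===== SOURCE A (Python) =====
-- def abs_fibo(n, k):
--     f = [1, 1]
--     d = (10**k)
--     if n < 2:
--         return 1
--     else:
--         for i in range(n-1):
--             s = (f[0] + f[1]) % d
--             f[0] = f[1]
--             f[1] = s
--         return f[1]
-- ===== SOURCE B (Python) =====
-- def abs_fibo(n, k):
--     if n < 2:
--         return 1
--     d = 10 ** k
--
--     def fib_pair(m):
--         # returns (F(m) % d, F(m+1) % d) with F(0)=0, F(1)=1, by fast doubling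
--         if m == 0:
--             return (0 % d, 1 % d)
--         a, b = fib_pair(m // 2)
--         c = (a * (2 * b - a)) % d
--         t = (a * a + b * b) % d
--         if m % 2 == 0:
--             return (c, t)
--         return (t, (c + t) % d)
--
--     return fib_pair(n + 1)[0]
-- ===== Notes on version B (the rewrite author's own statement) =====
-- stated objective: faster
-- what changed: Replaces the linear addition loop by recursive fast doubling (F(2m), F(2m+1) from F(m), F(m+1)) modulo 10**k; intended as asymptotically faster (O(log n) vs O(n) steps); measured 28.75x at the largest size both finished (n=65536).
-- outside the precondition, e.g. on abs_fibo(3, -1): A returns 0.09999999999999981, B returns 2.999999999999988e-08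
import Mathlib
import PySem

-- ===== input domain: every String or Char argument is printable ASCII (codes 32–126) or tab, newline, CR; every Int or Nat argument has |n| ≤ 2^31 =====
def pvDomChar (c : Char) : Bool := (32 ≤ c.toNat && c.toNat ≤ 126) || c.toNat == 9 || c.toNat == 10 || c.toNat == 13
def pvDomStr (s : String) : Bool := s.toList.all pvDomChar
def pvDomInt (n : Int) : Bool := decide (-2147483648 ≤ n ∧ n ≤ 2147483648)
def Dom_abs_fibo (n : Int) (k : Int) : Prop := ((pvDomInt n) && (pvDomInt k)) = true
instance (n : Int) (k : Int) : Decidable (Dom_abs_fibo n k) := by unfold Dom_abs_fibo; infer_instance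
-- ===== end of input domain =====

-- B replaces A's linear addition loop by recursive fast doubling modulo 10^k; intended as faster (measured 28.75x at the largest size both finished in a timing run).


-- ===== PORT A =====
-- literal port of A: f = [1,1]; d = 10**k; loop n-1 times s = (f[0]+f[1]) % d; f = [f[1], s]; return f[1]
-- (on the admitted inputs k ≥ 0 whenever the loop runs, so 10**k = 10 ^ k.toNat exactly)
def abs_fibo (n : Int) (k : Int) : Int :=
  let d : Int := 10 ^ k.toNat
  if n < 2 then 1
  else
    let f := (PySem.List.pyRange 0 (n - 1) 1).foldl
      (fun (f : Int × Int) _ => (f.2, PySem.Int.mod (f.1 + f.2) d)) (1, 1)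
    f.2

-- ===== PORT B =====
-- fib_pair m = (F(m) % d, F(m+1) % d) by fast doubling; m stays ≥ 0 in Python's recursion,
-- so Nat recursion with Nat division m / 2 is exact for Python's m // 2.
def pvFibPair (d : Int) : Nat → Int × Int
  | 0 => (PySem.Int.mod 0 d, PySem.Int.mod 1 d)
  | (m + 1) =>
    let p := pvFibPair d ((m + 1) / 2)
    let a := p.1
    let b := p.2
    let c := PySem.Int.mod (a * (2 * b - a)) d
    let t := PySem.Int.mod (a * a + b * b) d
    if (m + 1) % 2 == 0 then (c, t) else (t, PySem.Int.mod (c + t) d)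
decreasing_by exact Nat.div_lt_self (Nat.succ_pos m) (by norm_num)

def abs_fibo_alt (n : Int) (k : Int) : Int :=
  if n < 2 then 1
  else
    let d : Int := 10 ^ k.toNat
    (pvFibPair d (n + 1).toNat).1

-- ===== PRECONDITION & SPEC =====
-- Pre_ excludes n ≥ 2 with k < 0: there Python's 10**k is a float and A returns a float, not an int.
def Pre_abs_fibo (n : Int) (k : Int) : Prop := n < 2 ∨ 0 ≤ k
instance (n : Int) (k : Int) : Decidable (Pre_abs_fibo n k) := by unfold Pre_abs_fibo; infer_instance
def pvWitness_abs_fibo : Int × Int := (10, 3)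

def Spec_abs_fibo (n : Int) (k : Int) (out : Int) : Prop := out = abs_fibo_alt n k
instance (n : Int) (k : Int) (out : Int) : Decidable (Spec_abs_fibo n k out) := by unfold Spec_abs_fibo; infer_instance

-- ===== CLAIM (what is proved, stated in full; the proofs are below) =====
def Claim_equal_abs_fibo : Prop := ∀ (n : Int) (k : Int), Dom_abs_fibo n k → Pre_abs_fibo n k → Spec_abs_fibo n k (abs_fibo n k)

-- ===== LEMMAS AND PROOFS =====

-- the loop of A, indexed by the number of iterations
def pvLoopA (d : Int) (m : Nat) : Int × Int :=
  (List.range m).foldl (fun (f : Int × Int) _ => (f.2, (f.1 + f.2) % d)) (1, 1)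

-- invariant of A's loop: the state tracks (F(m+1), F(m+2)) mod d; the second
-- component is literally F(m+2) % d once the loop has run at least once
lemma pvLoopA_inv (d : Int) (m : Nat) :
    (pvLoopA d m).1 % d = ((Nat.fib (m + 1) : Int)) % d ∧
    (pvLoopA d m).2 % d = ((Nat.fib (m + 2) : Int)) % d ∧
    (1 ≤ m → (pvLoopA d m).2 = ((Nat.fib (m + 2) : Int)) % d) := by
  induction m with
  | zero => simp [pvLoopA, Nat.fib]
  | succ m ih =>
    obtain ⟨h1, h2, _⟩ := ih
    have hstep : pvLoopA d (m + 1) =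
        ((pvLoopA d m).2, ((pvLoopA d m).1 + (pvLoopA d m).2) % d) := by
      simp [pvLoopA, List.range_succ, List.foldl_append]
    have hmod : ((pvLoopA d m).1 + (pvLoopA d m).2) % d
        = ((Nat.fib (m + 1) : Int) + (Nat.fib (m + 2) : Int)) % d := by
      have := Int.ModEq.add (show (pvLoopA d m).1 ≡ (Nat.fib (m + 1) : Int) [ZMOD d] from h1)
        (show (pvLoopA d m).2 ≡ (Nat.fib (m + 2) : Int) [ZMOD d] from h2)
      exact this
    have hfib : ((Nat.fib (m + 1) : Int) + (Nat.fib (m + 2) : Int)) = (Nat.fib (m + 3) : Int) := by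
      have := Nat.fib_add_two (n := m + 1)
      push_cast [this]; ring
    refine ⟨?_, ?_, ?_⟩
    · rw [hstep]; exact h2
    · rw [hstep]; simp only [Int.emod_emod_of_dvd _ dvd_rfl, hmod, hfib]
    · intro _; rw [hstep]; simp only [hmod, hfib]

-- F(m) ≤ 2·F(m+1) (needed to push the Nat subtraction in fib_two_mul to Int)
lemma pvFib_le (m : Nat) : Nat.fib m ≤ 2 * Nat.fib (m + 1) := by
  have := Nat.fib_le_fib_succ (n := m)
  omega

-- the fast-doubling recursion computes (F(m) % d, F(m+1) % d)
lemma pvFibPair_eq (d : Int) (m : Nat) (hd : 0 < d) :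
    pvFibPair d m = (((Nat.fib m : Int)) % d, ((Nat.fib (m + 1) : Int)) % d) := by
  induction m using Nat.strong_induction_on with
  | _ m ih =>
    match m with
    | 0 => simp [pvFibPair, PySem.Int.mod_eq_emod_of_pos hd, Nat.fib]
    | (m + 1) =>
      have hlt : (m + 1) / 2 < m + 1 := Nat.div_lt_self (Nat.succ_pos m) (by norm_num)
      have hp := ih ((m + 1) / 2) hlt
      set h := (m + 1) / 2 with hh
      have ha : ((Nat.fib h : Int)) % d ≡ (Nat.fib h : Int) [ZMOD d] :=
        Int.emod_emod_of_dvd _ dvd_rfl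
      have hb : ((Nat.fib (h + 1) : Int)) % d ≡ (Nat.fib (h + 1) : Int) [ZMOD d] :=
        Int.emod_emod_of_dvd _ dvd_rfl
      -- the two doubling identities, cast to Int
      have hc : (((Nat.fib h : Int)) % d * (2 * (((Nat.fib (h + 1) : Int)) % d) - ((Nat.fib h : Int)) % d)) % d
          = ((Nat.fib (2 * h) : Int)) % d := by
        have hid : ((Nat.fib (2 * h) : Int)) = (Nat.fib h : Int) * (2 * (Nat.fib (h + 1) : Int) - (Nat.fib h : Int)) := by
          have h2 := pvFib_le h
          push_cast [Nat.fib_two_mul, h2]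
          ring
        rw [hid]
        exact Int.ModEq.mul ha (((Int.ModEq.mul_left 2 hb)).sub ha)
      have ht : (((Nat.fib h : Int)) % d * (((Nat.fib h : Int)) % d) + ((Nat.fib (h + 1) : Int)) % d * (((Nat.fib (h + 1) : Int)) % d)) % d
          = ((Nat.fib (2 * h + 1) : Int)) % d := by
        have hid : ((Nat.fib (2 * h + 1) : Int)) = (Nat.fib h : Int) * (Nat.fib h : Int) + (Nat.fib (h + 1) : Int) * (Nat.fib (h + 1) : Int) := by
          push_cast [Nat.fib_two_mul_add_one]
          ring
        rw [hid]
        exact Int.ModEq.add (Int.ModEq.mul ha ha) (Int.ModEq.mul hb hb)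
      have hsum : (((Nat.fib (2 * h) : Int)) % d + ((Nat.fib (2 * h + 1) : Int)) % d) % d
          = ((Nat.fib (2 * h + 2) : Int)) % d := by
        have hid : ((Nat.fib (2 * h + 2) : Int)) = (Nat.fib (2 * h) : Int) + (Nat.fib (2 * h + 1) : Int) := by
          have := Nat.fib_add_two (n := 2 * h)
          push_cast [this]; ring
        rw [hid]
        exact Int.ModEq.add (Int.emod_emod_of_dvd _ dvd_rfl) (Int.emod_emod_of_dvd _ dvd_rfl)
      rcases Nat.even_or_odd (m + 1) with he | ho
      · have heq : m + 1 = 2 * h := by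
          rcases he with ⟨t, hte⟩; omega
        have hmod2 : (m + 1) % 2 = 0 := by omega
        rw [pvFibPair]
        simp only [← hh, hp, hmod2, PySem.Int.mod_eq_emod_of_pos hd]
        rw [if_pos (by decide)]
        rw [heq, hc, ht]
      · have heq : m + 1 = 2 * h + 1 := by
          rcases ho with ⟨t, hte⟩; omega
        have hmod2 : (m + 1) % 2 = 1 := by omega
        rw [pvFibPair]
        simp only [← hh, hp, hmod2, PySem.Int.mod_eq_emod_of_pos hd]
        rw [if_neg (by decide)]
        rw [hc, ht, hsum]
        have e1 : 2 * h + 1 = m + 1 := by omega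
        have e2 : 2 * h + 2 = m + 1 + 1 := by omega
        rw [e1, e2]

-- the pyRange fold of port A is pvLoopA
lemma pvLoopA_pyRange (d : Int) (n : Int) :
    (PySem.List.pyRange 0 (n - 1) 1).foldl
      (fun (f : Int × Int) _ => (f.2, PySem.Int.mod (f.1 + f.2) d)) (1, 1)
    = (List.range (n - 1).toNat).foldl
      (fun (f : Int × Int) _ => (f.2, PySem.Int.mod (f.1 + f.2) d)) (1, 1) := by
  rw [PySem.List.pyRange_one, List.foldl_map]
  simp

-- ===== VERDICT (by name: the statement is the Claim_ definition above) =====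
theorem abs_fibo_spec : Claim_equal_abs_fibo := by
  intro n k _ hpre
  unfold Spec_abs_fibo abs_fibo abs_fibo_alt
  by_cases hn : n < 2
  · simp [hn]
  · have hk : 0 ≤ k := hpre.resolve_left hn
    have hn2 : 2 ≤ n := by omega
    simp only [if_neg hn]
    set d : Int := 10 ^ k.toNat with hd
    have hdpos : 0 < d := by positivity
    have hmodeq : ∀ x : Int, PySem.Int.mod x d = x % d :=
      fun x => PySem.Int.mod_eq_emod_of_pos hdpos
    rw [pvLoopA_pyRange]
    have hfold : (List.range (n - 1).toNat).foldl
        (fun (f : Int × Int) _ => (f.2, PySem.Int.mod (f.1 + f.2) d)) (1, 1)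
        = pvLoopA d (n - 1).toNat := by
      unfold pvLoopA
      simp only [hmodeq]
    rw [hfold]
    have hA := (pvLoopA_inv d (n - 1).toNat).2.2 (by omega)
    have hB := pvFibPair_eq d (n + 1).toNat hdpos
    have hnat : (n + 1).toNat = (n - 1).toNat + 2 := by omega
    rw [hA, hB, hnat]
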